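-- pv_equiv track=rewrite | github.com/Luisdergoat/42-Python-03 | ex3/ft_achievement_tracker.py | get_rare_achievements
-- ===== SOURCE A (Python) =====
-- def get_rare_achievements(players_dict):
--     """Get a set of achievements that are unique to each player."""
--     ach_counts = {}
--     for achievements in players_dict.values():
--         for achievement in achievements:
--             ach_counts[achievement] = ach_counts.get(achievement, 0) + 1
--     rare_achievements = {
--         achievement for achievement, count in ach_counts.items() if count == 1
--     }
--     return rare_achievements
-- ===== SOURCE B (Python) =====
-- def get_rare_achievements(players_dict):
--     """Get a set of achievements that are unique to each player."""
--     seen_once = set()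
--     seen_more = set()
--     for achievements in players_dict.values():
--         for achievement in achievements:
--             if achievement in seen_more:
--                 pass
--             elif achievement in seen_once:
--                 seen_once.discard(achievement)
--                 seen_more.add(achievement)
--             else:
--                 seen_once.add(achievement)
--     return seen_once
-- ===== Notes on version B (the rewrite author's own statement) =====
-- stated objective: alternative
-- what changed: Replaces the count-dict-then-filter decomposition with a single pass that maintains two sets (seen once / seen more than once) and never stores counts.
import Mathlib
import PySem

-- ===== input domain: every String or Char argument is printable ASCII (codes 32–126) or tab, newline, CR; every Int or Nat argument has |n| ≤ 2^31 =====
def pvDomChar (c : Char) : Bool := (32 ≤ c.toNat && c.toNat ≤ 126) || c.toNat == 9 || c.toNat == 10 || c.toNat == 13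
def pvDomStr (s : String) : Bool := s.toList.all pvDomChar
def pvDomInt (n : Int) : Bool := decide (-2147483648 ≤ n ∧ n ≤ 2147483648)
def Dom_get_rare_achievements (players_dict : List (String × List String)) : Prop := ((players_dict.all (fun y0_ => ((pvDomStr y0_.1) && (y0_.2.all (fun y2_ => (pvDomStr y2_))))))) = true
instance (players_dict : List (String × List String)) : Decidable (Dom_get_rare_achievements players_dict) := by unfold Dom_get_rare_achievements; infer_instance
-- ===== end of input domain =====

-- B replaces A's count-dict-then-filter decomposition by a single pass maintaining two
-- sets (seen once / seen more than once); same O(n) cost, no counts stored.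

-- ===== PORT A =====
def get_rare_achievements (players_dict : List (String × List String)) : List String :=
  let ach_counts : PySem.Dict String Int :=
    players_dict.foldl
      (fun d p => p.2.foldl (fun d a => d.modify a 0 (· + 1)) d)
      PySem.Dict.empty
  PySem.Set.ofList ((ach_counts.items.filter (fun p => p.2 == 1)).map (·.1))

-- ===== PORT B =====
def pvStep (st : PySem.Set String × PySem.Set String) (a : String) :
    PySem.Set String × PySem.Set String :=
  if PySem.Set.contains st.2 a then st
  else if PySem.Set.contains st.1 a then (PySem.Set.discard st.1 a, PySem.Set.add st.2 a)
  else (PySem.Set.add st.1 a, st.2)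

def get_rare_achievements_alt (players_dict : List (String × List String)) : List String :=
  (players_dict.foldl (fun st p => p.2.foldl pvStep st)
    ((PySem.Set.empty : PySem.Set String), (PySem.Set.empty : PySem.Set String))).1

-- ===== PRECONDITION & SPEC =====
def Spec_get_rare_achievements (players_dict : List (String × List String)) (out : List String) : Prop := out = get_rare_achievements_alt players_dict
instance (players_dict : List (String × List String)) (out : List String) : Decidable (Spec_get_rare_achievements players_dict out) := by unfold Spec_get_rare_achievements; infer_instance

-- ===== CLAIM (what is proved, stated in full; the proofs are below) =====
def Claim_equal_get_rare_achievements : Prop := ∀ (players_dict : List (String × List String)), Dom_get_rare_achievements players_dict → Spec_get_rare_achievements players_dict (get_rare_achievements players_dict)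

-- ===== LEMMAS AND PROOFS =====

-- a nested fold over the players' lists is a fold over the flattened list of achievements
theorem foldl_nested_flatMap {σ : Type} (f : σ → String → σ) :
    ∀ (ps : List (String × List String)) (init : σ),
      ps.foldl (fun s p => p.2.foldl f s) init = (ps.flatMap (·.2)).foldl f init := by
  intro ps
  induction ps with
  | nil => intro init; rfl
  | cons p t ih =>
    intro init
    simp [List.flatMap_cons, List.foldl_append, ih]

-- invariant of B's single pass over the flattened achievement list xs:
-- first component = first occurrences with total count 1; second = exactly the elements with count ≥ 2
theorem pvStep_invariant (xs : List String) :
    (xs.foldl pvStep ((PySem.Set.empty : PySem.Set String), (PySem.Set.empty : PySem.Set String))).1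
      = (PySem.Set.ofList xs).filter (fun k => xs.count k == 1)
    ∧ ∀ k, k ∈ (xs.foldl pvStep ((PySem.Set.empty : PySem.Set String), (PySem.Set.empty : PySem.Set String))).2
          ↔ 2 ≤ xs.count k := by
  induction xs using List.reverseRecOn with
  | nil => simp [PySem.Set.empty]
  | append_singleton xs a ih =>
    obtain ⟨h1, h2⟩ := ih
    rw [List.foldl_append]
    set st := xs.foldl pvStep ((PySem.Set.empty : PySem.Set String), (PySem.Set.empty : PySem.Set String)) with hst
    have hmem1 : ∀ k, k ∈ st.1 ↔ k ∈ xs ∧ xs.count k = 1 := by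
      intro k
      rw [h1]
      simp [List.mem_filter, PySem.Set.mem_ofList]
    by_cases hm : a ∈ st.2
    · -- a seen more than twice already
      have hc : 2 ≤ xs.count a := (h2 a).mp hm
      have hstep : pvStep st a = st := by
        unfold pvStep
        rw [if_pos (by simpa [PySem.Set.contains_iff] using hm)]
      rw [List.foldl_cons, List.foldl_nil, hstep]
      constructor
      · rw [h1]
        have hmemxs : a ∈ xs := List.count_pos_iff.mp (by omega)
        rw [PySem.Set.ofList_append_singleton, PySem.Set.add_of_mem (by simpa [PySem.Set.mem_ofList] using hmemxs)]
        apply List.filter_congr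
        intro k hk
        rcases eq_or_ne k a with rfl | hne
        · simp [List.count_append]; omega
        · simp [List.count_append, Ne.symm hne]
      · intro k
        rw [h2]
        rcases eq_or_ne k a with rfl | hne
        · simp [List.count_append]
          exact iff_of_true hc (List.count_pos_iff.mp (by omega))
        · simp [List.count_append, Ne.symm hne]
    · by_cases ho : a ∈ st.1
      · -- second occurrence: move a from seen_once to seen_more
        have hc : xs.count a = 1 := ((hmem1 a).mp ho).2
        have hmemxs : a ∈ xs := ((hmem1 a).mp ho).1
        have hstep : pvStep st a = (PySem.Set.discard st.1 a, PySem.Set.add st.2 a) := by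
          unfold pvStep
          rw [if_neg (by simpa [PySem.Set.contains_iff] using hm),
              if_pos (by simpa [PySem.Set.contains_iff] using ho)]
        rw [List.foldl_cons, List.foldl_nil, hstep]
        constructor
        · show PySem.Set.discard st.1 a = _
          rw [h1, PySem.Set.discard, List.filter_filter,
              PySem.Set.ofList_append_singleton,
              PySem.Set.add_of_mem (by simpa [PySem.Set.mem_ofList] using hmemxs)]
          apply List.filter_congr
          intro k hk
          rcases eq_or_ne k a with rfl | hne
          · simp [List.count_append]; omega
          · simp [List.count_append, hne, Ne.symm hne]
        · intro k
          show k ∈ PySem.Set.add st.2 a ↔ _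
          rw [PySem.Set.mem_add, h2]
          rcases eq_or_ne k a with rfl | hne
          · simp [List.count_append]; omega
          · simp [List.count_append, hne, Ne.symm hne]
      · -- first occurrence
        have hnotxs : a ∉ xs := by
          intro hmemxs
          have hpos : 0 < xs.count a := List.count_pos_iff.mpr hmemxs
          have h2' : ¬ 2 ≤ xs.count a := fun h => hm ((h2 a).mpr h)
          have h1' : ¬ (a ∈ xs ∧ xs.count a = 1) := fun h => ho ((hmem1 a).mpr h)
          have : xs.count a ≠ 1 := fun h => h1' ⟨hmemxs, h⟩
          omega
        have hc0 : xs.count a = 0 := List.count_eq_zero.mpr hnotxs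
        have hstep : pvStep st a = (PySem.Set.add st.1 a, st.2) := by
          unfold pvStep
          rw [if_neg (by simpa [PySem.Set.contains_iff] using hm),
              if_neg (by simpa [PySem.Set.contains_iff] using ho)]
        rw [List.foldl_cons, List.foldl_nil, hstep]
        constructor
        · show PySem.Set.add st.1 a = _
          rw [PySem.Set.add_of_not_mem ho, h1,
              PySem.Set.ofList_append_singleton,
              PySem.Set.add_of_not_mem (by simpa [PySem.Set.mem_ofList] using hnotxs),
              List.filter_append]
          congr 1
          · apply List.filter_congr
            intro k hk
            have hkxs : k ∈ xs := by simpa [PySem.Set.mem_ofList] using hk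
            have hne : k ≠ a := fun h => hnotxs (h ▸ hkxs)
            simp [List.count_append, Ne.symm hne]
          · simp [List.count_append, hc0]
        · intro k
          rw [h2]
          rcases eq_or_ne k a with rfl | hne
          · simp [List.count_append, hc0]
          · simp [List.count_append, Ne.symm hne]

-- A's result over the flattened list, via the counter characterisation
theorem portA_eq_filter (ps : List (String × List String)) :
    get_rare_achievements ps
      = (PySem.Set.ofList (ps.flatMap (·.2))).filter
          (fun k => (ps.flatMap (·.2)).count k == 1) := by
  unfold get_rare_achievements
  rw [foldl_nested_flatMap, ← PySem.Dict.counter_eq_foldl]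
  set xs := ps.flatMap (·.2) with hxs
  show PySem.Set.ofList (((PySem.Dict.counter xs).items.filter (fun p => p.2 == 1)).map (·.1))
      = (PySem.Set.ofList xs).filter (fun k => xs.count k == 1)
  rw [PySem.Dict.items_counter]
  rw [List.filter_map, List.map_map]
  have hmapid : ((fun (p : String × Int) => p.1) ∘ (fun k => (k, (xs.count k : Int)))) = id := rfl
  rw [hmapid, List.map_id,
      PySem.Set.ofList_eq_self_of_nodup _ (List.Nodup.filter _ (PySem.Set.nodup_ofList xs))]
  apply List.filter_congr
  intro k hk
  simp [Function.comp]

-- ===== VERDICT (by name: the statement is the Claim_ definition above) =====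
theorem get_rare_achievements_spec : Claim_equal_get_rare_achievements := by
  intro ps _
  show get_rare_achievements ps = get_rare_achievements_alt ps
  unfold get_rare_achievements_alt
  rw [foldl_nested_flatMap, (pvStep_invariant (ps.flatMap (·.2))).1, portA_eq_filter]
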